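-- pv_equiv track=rewrite | github.com/goedelcodeprover/Goedel-Code-Prover | prover/diff_utils.py | _find_match_normalized
-- ===== SOURCE A (Python) =====
-- from typing import List, Optional, Tuple
--
-- def _find_match_normalized(result_lines: List[str], search_lines: List[str]) -> Optional[int]:
--     """Find match with all whitespace normalized."""
--     def normalize(line: str) -> str:
--         return ' '.join(line.split())
--
--     result_norm = [normalize(line) for line in result_lines]
--     search_norm = [normalize(line) for line in search_lines]
--
--     for i in range(len(result_norm) - len(search_norm) + 1):
--         if result_norm[i : i + len(search_norm)] == search_norm:
--             return i
--     return None
-- ===== SOURCE B (Python) =====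
-- from typing import List, Optional
--
-- def _find_match_normalized(result_lines: List[str], search_lines: List[str]) -> Optional[int]:
--     """Find match with all whitespace normalized (rolling-fingerprint scan)."""
--     def normalize(line: str) -> str:
--         return ' '.join(line.split())
--
--     def fp(s: str) -> int:
--         h = len(s)
--         for ch in s:
--             h = h * 131 + ord(ch)
--         return h
--
--     search_norm = [normalize(line) for line in search_lines]
--     result_norm = [normalize(line) for line in result_lines]
--     m = len(search_norm)
--     n = len(result_norm)
--     if m > n:
--         return None
--     target = sum(map(fp, search_norm))
--     fps = [fp(s) for s in result_norm]
--     window = sum(fps[:m])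
--     for i in range(n - m + 1):
--         if window == target and result_norm[i:i + m] == search_norm:
--             return i
--         if i + m < n:
--             window += fps[i + m] - fps[i]
--     return None
-- ===== Notes on version B (the rewrite author's own statement) =====
-- stated objective: alternative
-- what changed: Replaces A's compare-a-fresh-slice-at-every-offset scan with a Rabin-Karp style rolling fingerprint over the normalized lines: each line gets an integer fingerprint once, a window sum is updated in O(1) per offset, and the full slice comparison runs only at offsets whose fingerprint sum matches (not measurably faster in a timing run: Python's C-level slice compare is cheap, the per-offset big-int bookkeeping is not).
import Mathlib
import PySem

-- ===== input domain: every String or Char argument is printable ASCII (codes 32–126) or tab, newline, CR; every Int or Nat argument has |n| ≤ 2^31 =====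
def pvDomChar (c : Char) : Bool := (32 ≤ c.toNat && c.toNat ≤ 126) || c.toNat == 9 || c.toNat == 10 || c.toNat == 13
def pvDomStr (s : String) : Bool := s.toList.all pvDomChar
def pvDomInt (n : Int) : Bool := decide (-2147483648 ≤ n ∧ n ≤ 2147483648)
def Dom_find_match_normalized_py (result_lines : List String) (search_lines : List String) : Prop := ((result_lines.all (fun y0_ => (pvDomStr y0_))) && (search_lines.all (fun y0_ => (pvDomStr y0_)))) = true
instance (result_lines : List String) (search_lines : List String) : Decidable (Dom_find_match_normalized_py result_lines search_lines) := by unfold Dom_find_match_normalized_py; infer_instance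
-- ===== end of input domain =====

-- B replaces A's slice-comparison-at-every-offset scan by a rolling-fingerprint (Rabin–Karp style)
-- scan that compares line slices only at positions whose window fingerprint matches.

-- ===== PORT A =====
-- normalize(line) = ' '.join(line.split())
def pvNormA (line : String) : String := PySem.Str.join " " (PySem.Str.split₀ line)

def find_match_normalized_py (result_lines : List String) (search_lines : List String) : Option Int :=
  let result_norm := result_lines.map pvNormA
  let search_norm := search_lines.map pvNormA
  (PySem.List.pyRange 0 ((result_norm.length : Int) - (search_norm.length : Int) + 1) 1).foldl
    (fun acc i =>
      match acc with
      | some _ => acc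
      | none =>
        if PySem.List.slice result_norm (some i) (some (i + (search_norm.length : Int))) = search_norm
        then some i else none)
    none

-- ===== PORT B =====
def pvNormB (line : String) : String := PySem.Str.join " " (PySem.Str.split₀ line)

-- fp(s): h = len(s); for ch in s: h = h*131 + ord(ch)
def pvFp (s : String) : Int :=
  s.toList.foldl (fun h c => h * 131 + (c.toNat : Int)) (PySem.Str.len s)

-- the 'for i in range(n - m + 1)' loop of B, with i and the rolling window as state
def pvAltLoop (result_norm search_norm : List String) (fps : List Int) (target : Int)
    (m n : Nat) : Nat → Nat → Int → Option Int
  | 0, _, _ => none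
  | cnt + 1, i, window =>
    if window = target ∧
        PySem.List.slice result_norm (some (i : Int)) (some ((i : Int) + (m : Int))) = search_norm
    then some (i : Int)
    else pvAltLoop result_norm search_norm fps target m n cnt (i + 1)
      (if i + m < n then
        window + (PySem.List.pyGetD fps ((i : Int) + (m : Int)) 0 - PySem.List.pyGetD fps (i : Int) 0)
       else window)

def find_match_normalized_py_alt (result_lines : List String) (search_lines : List String) : Option Int :=
  let search_norm := search_lines.map pvNormB
  let result_norm := result_lines.map pvNormB
  let m := search_norm.length
  let n := result_norm.length
  if m > n then none
  else
    let target := (search_norm.map pvFp).sum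
    let fps := result_norm.map pvFp
    let window := (PySem.List.slice fps none (some (m : Int))).sum
    pvAltLoop result_norm search_norm fps target m n (n - m + 1) 0 window

-- ===== PRECONDITION & SPEC =====
def Spec_find_match_normalized_py (result_lines : List String) (search_lines : List String) (out : Option Int) : Prop := out = find_match_normalized_py_alt result_lines search_lines
instance (result_lines : List String) (search_lines : List String) (out : Option Int) : Decidable (Spec_find_match_normalized_py result_lines search_lines out) := by unfold Spec_find_match_normalized_py; infer_instance

-- ===== CLAIM (what is proved, stated in full; the proofs are below) =====
def Claim_equal_find_match_normalized_py : Prop := ∀ (result_lines : List String) (search_lines : List String), Dom_find_match_normalized_py result_lines search_lines → Spec_find_match_normalized_py result_lines search_lines (find_match_normalized_py result_lines search_lines)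

-- ===== LEMMAS AND PROOFS =====

-- reference "first match" function both loops are reduced to
def pvAux (R S : List String) (m : Nat) : Nat → Nat → Option Int
  | 0, _ => none
  | cnt + 1, i => if (R.drop i).take m = S then some (i : Int) else pvAux R S m cnt (i + 1)

theorem pvA_foldl_some (l : List Int) (S R : List String) (x : Int) :
    l.foldl
      (fun acc i =>
        match acc with
        | some _ => acc
        | none =>
          if PySem.List.slice R (some i) (some (i + (S.length : Int))) = S
          then some i else none)
      (some x) = some x := by
  induction l with
  | nil => rfl
  | cons a l ih => simpa using ih

theorem pvA_loop_eq (R S : List String) (cnt i : Nat) :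
    (PySem.List.pyRange (i : Int) ((i : Int) + (cnt : Int)) 1).foldl
      (fun acc j =>
        match acc with
        | some _ => acc
        | none =>
          if PySem.List.slice R (some j) (some (j + (S.length : Int))) = S
          then some j else none)
      none = pvAux R S S.length cnt i := by
  induction cnt generalizing i with
  | zero => simp [PySem.List.pyRange_one_eq_nil, pvAux]
  | succ c ih =>
    rw [PySem.List.pyRange_one_cons (by push_cast; omega)]
    simp only [List.foldl_cons]
    rw [show ((i : Int) + ((c : Nat) + 1 : Nat)) = ((i + 1 : Nat) : Int) + (c : Int) by push_cast; ring]
    rw [PySem.List.slice_natCast_add]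
    by_cases h : (R.drop i).take S.length = S
    · simp [pvAux, h, pvA_foldl_some]
    · simp only [h, if_false]
      simpa [pvAux, h] using ih (i + 1)

theorem pvB_loop_eq (R S : List String) (m n : Nat) (hm : m = S.length) (hn : n = R.length)
    (hmn : m ≤ n) (cnt i : Nat) (window : Int)
    (hcnt : i + cnt ≤ n - m + 1)
    (hw : window = (((R.drop i).take m).map pvFp).sum) :
    pvAltLoop R S (R.map pvFp) ((S.map pvFp).sum) m n cnt i window = pvAux R S m cnt i := by
  induction cnt generalizing i window with
  | zero => rfl
  | succ c ih =>
    rw [pvAltLoop, pvAux]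
    rw [show ((i : Int) + (m : Int)) = ((i + m : Nat) : Int) by push_cast; ring,
       PySem.List.slice_natCast, Nat.add_sub_cancel_left]
    have hcond : (window = (S.map pvFp).sum ∧ (R.drop i).take m = S) ↔ (R.drop i).take m = S := by
      constructor
      · exact fun h => h.2
      · intro h; exact ⟨by rw [hw, h], h⟩
    rw [if_congr hcond rfl rfl]
    by_cases h : (R.drop i).take m = S
    · simp [h]
    · rw [if_neg h, if_neg h]
      cases c with
      | zero => rfl
      | succ c' =>
        apply ih
        · omega
        · -- the rolling update keeps the window equal to the fingerprint sum of the next slice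
          have him : i + m < n := by omega
          have hiR : i < R.length := by omega
          have hfps1 : PySem.List.pyGetD (R.map pvFp) (((i + m : Nat) : Int)) 0 = pvFp (R[i + m]'(by omega)) := by
            rw [PySem.List.pyGetD_natCast, List.getD_eq_getElem (R.map pvFp) 0 (by simp; omega)]
            simp
          have hfps2 : PySem.List.pyGetD (R.map pvFp) ((i : Int)) 0 = pvFp (R[i]'hiR) := by
            rw [PySem.List.pyGetD_natCast, List.getD_eq_getElem (R.map pvFp) 0 (by simp; omega)]
            simp
          simp only [him, if_pos, hfps1, hfps2, hw]
          -- sum over window at i+1 = sum at i - fp R[i] + fp R[i+m]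
          cases m with
          | zero => simp
          | succ k =>
            have hd : R.drop i = R[i]'hiR :: R.drop (i + 1) := List.drop_eq_getElem_cons hiR
            have h1 : (R.drop i).take (k + 1) = R[i]'hiR :: (R.drop (i + 1)).take k := by
              rw [hd, List.take_succ_cons]
            have hk : k < (R.drop (i + 1)).length := by simp; omega
            have h2 : (R.drop (i + 1)).take (k + 1)
                = (R.drop (i + 1)).take k ++ [(R.drop (i + 1))[k]'hk] := by
              rw [List.take_add_one, List.getElem?_eq_getElem hk]
              simp
            have h3 : (R.drop (i + 1))[k]'hk = R[i + (k + 1)]'(by omega) := by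
              simp only [List.getElem_drop]
              congr 1
              omega
            rw [h1, h2, h3]
            simp only [List.map_cons, List.map_append, List.sum_cons, List.sum_append,
              List.map_nil, List.sum_nil]
            ring

-- ===== VERDICT (by name: the statement is the Claim_ definition above) =====
theorem find_match_normalized_py_spec : Claim_equal_find_match_normalized_py := by
  intro result_lines search_lines _hdom
  unfold Spec_find_match_normalized_py find_match_normalized_py find_match_normalized_py_alt
  have hnb : pvNormB = pvNormA := rfl
  rw [hnb]
  dsimp only
  set R := result_lines.map pvNormA with hR
  set S := search_lines.map pvNormA with hS
  by_cases hmn : S.length > R.length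
  · rw [if_pos hmn, PySem.List.pyRange_one_eq_nil (by omega)]
    rfl
  · have hmn' : S.length ≤ R.length := by omega
    rw [if_neg hmn]
    have hA := pvA_loop_eq R S (R.length - S.length + 1) 0
    rw [show ((0 : Nat) : Int) + ((R.length - S.length + 1 : Nat) : Int)
        = (R.length : Int) - (S.length : Int) + 1 by push_cast [hmn']; omega] at hA
    rw [show ((0 : Nat) : Int) = (0 : Int) from rfl] at hA
    rw [hA]
    rw [pvB_loop_eq R S S.length R.length rfl rfl hmn' (R.length - S.length + 1) 0 _ (by omega)]
    rw [PySem.List.slice_to_natCast, ← List.map_take]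
    simp
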